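-- pv_equiv track=rewrite | github.com/gautelinga/liquid_bridge_conductance | geometry_analyze.py | get_boundary_points
-- ===== SOURCE A (Python) =====
-- def get_boundary_points(v, f):
--     e = dict()
--     for iface, vloc_ in enumerate(f):
--         v1, v2, v3 = list(sorted(vloc_))
--         edges = [(v1, v2), (v1, v3), (v2, v3)]
--         for edge in edges:
--             if edge in e:
--                 e[edge].append(iface)
--             else:
--                 e[edge] = [iface]
--
--     boundary_nodes = set()
--     for key, val in e.items():
--         if len(val) == 1:
--             boundary_nodes.update(set(key))
--
--     return list(sorted(boundary_nodes))
-- ===== SOURCE B (Python) =====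
-- def get_boundary_points(v, f):
--     es = []
--     for face in f:
--         a, b, c = sorted(face)
--         es.append((a, b))
--         es.append((a, c))
--         es.append((b, c))
--     es.sort()
--     boundary = set()
--     i = 0
--     n = len(es)
--     while i < n:
--         j = i + 1
--         while j < n and es[j] == es[i]:
--             j += 1
--         if j - i == 1:
--             boundary.add(es[i][0])
--             boundary.add(es[i][1])
--         i = j
--     return sorted(boundary)
-- ===== Notes on version B (the rewrite author's own statement) =====
-- stated objective: alternative
-- what changed: Replaces the dict-of-incident-face-lists aggregation with a flat edge list that is sorted once and scanned in a single pass, grouping runs of identical edges and adding the vertices of length-1 runs to the boundary set.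
import Mathlib
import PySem

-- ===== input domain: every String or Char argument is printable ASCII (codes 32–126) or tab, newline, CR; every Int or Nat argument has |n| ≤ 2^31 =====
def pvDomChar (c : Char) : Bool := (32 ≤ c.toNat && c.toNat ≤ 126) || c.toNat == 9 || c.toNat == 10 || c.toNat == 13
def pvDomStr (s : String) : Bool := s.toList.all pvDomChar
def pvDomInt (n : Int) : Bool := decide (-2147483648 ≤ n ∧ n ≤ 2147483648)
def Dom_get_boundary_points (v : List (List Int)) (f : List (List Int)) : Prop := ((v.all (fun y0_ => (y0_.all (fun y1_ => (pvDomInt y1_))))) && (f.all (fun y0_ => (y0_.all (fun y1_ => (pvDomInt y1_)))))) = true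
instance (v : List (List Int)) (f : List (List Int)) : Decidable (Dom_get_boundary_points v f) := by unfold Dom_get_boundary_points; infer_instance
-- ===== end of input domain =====

-- B replaces A's dict of edge→incident-face lists by one flat sorted edge list scanned in a single
-- run-length pass (alternative decomposition, similar cost); equivalence is about the return value.

-- ===== PORT A =====
-- one inner-loop step of A: append iface to e[edge] or create e[edge] = [iface]
def pvAStep (d : PySem.Dict (Int × Int) (List Int)) (iface : Int) (edge : Int × Int) :
    PySem.Dict (Int × Int) (List Int) :=
  if d.contains edge then d.modify edge [] (fun l => l ++ [iface]) else d.insert edge [iface]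

-- the body of A's outer loop over enumerate(f) (unpacking 'v1, v2, v3' needs a 3-element face;
-- other lengths raise in Python and are excluded by Pre_)
def pvAFaceStep (d : PySem.Dict (Int × Int) (List Int)) (p : Int × List Int) :
    PySem.Dict (Int × Int) (List Int) :=
  match PySem.List.sorted p.2 (fun x => x) false with
  | [v1, v2, v3] =>
      [(v1, v2), (v1, v3), (v2, v3)].foldl (fun d edge => pvAStep d p.1 edge) d
  | _ => d

-- the body of A's loop over e.items(): boundary_nodes.update(set(key)) when len(val) == 1
def pvABoundStep (s : PySem.Set Int) (kv : (Int × Int) × List Int) : PySem.Set Int :=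
  if kv.2.length = 1 then PySem.Set.update s (PySem.Set.ofList [kv.1.1, kv.1.2]) else s

def get_boundary_points (v : List (List Int)) (f : List (List Int)) : List Int :=
  let e := (PySem.List.enumerate f 0).foldl pvAFaceStep PySem.Dict.empty
  let boundary_nodes := e.items.foldl pvABoundStep PySem.Set.empty
  PySem.List.sorted boundary_nodes (fun x => x) false

-- ===== PORT B =====
-- the three sorted-vertex edges of one face ('a, b, c = sorted(face)'; non-3 faces raise, see Pre_)
def pvEdges3 (face : List Int) : List (Int × Int) :=
  match PySem.List.sorted face (fun x => x) false with
  | [a, b, c] => [(a, b), (a, c), (b, c)]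
  | _ => []

-- B's run-length scan over the sorted edge list (the i/j while loops: one step consumes one run)
def pvScan (es : List (Int × Int)) (boundary : PySem.Set Int) : PySem.Set Int :=
  match es with
  | [] => boundary
  | e :: rest =>
      let same := rest.takeWhile (fun x => x == e)
      let rest' := rest.dropWhile (fun x => x == e)
      pvScan rest' (if same.length = 0 then PySem.Set.add (PySem.Set.add boundary e.1) e.2 else boundary)
termination_by es.length
decreasing_by
  simpa using Nat.lt_succ_of_le (List.length_dropWhile_le (fun x => x == e) rest)

def get_boundary_points_alt (v : List (List Int)) (f : List (List Int)) : List Int :=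
  let es := f.foldl (fun es face => es ++ pvEdges3 face) []
  let es := PySem.List.sorted2 es (fun e => e.1) (fun e => e.2) false
  PySem.List.sorted (pvScan es PySem.Set.empty) (fun x => x) false

-- ===== PRECONDITION & SPEC =====
-- Pre_ excludes exactly the inputs where both Pythons raise ValueError: a face whose length is not 3
-- makes the unpacking 'v1, v2, v3 = list(sorted(vloc_))' (A) / 'a, b, c = sorted(face)' (B) raise.
def Pre_get_boundary_points (v : List (List Int)) (f : List (List Int)) : Prop :=
  ∀ face ∈ f, face.length = 3
instance (v : List (List Int)) (f : List (List Int)) : Decidable (Pre_get_boundary_points v f) := by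
  unfold Pre_get_boundary_points; infer_instance

def pvWitness_get_boundary_points : List (List Int) × List (List Int) :=
  ([[0, 0, 0], [1, 0, 0], [0, 1, 0]], [[0, 1, 2]])

def Spec_get_boundary_points (v : List (List Int)) (f : List (List Int)) (out : List Int) : Prop := out = get_boundary_points_alt v f
instance (v : List (List Int)) (f : List (List Int)) (out : List Int) : Decidable (Spec_get_boundary_points v f out) := by unfold Spec_get_boundary_points; infer_instance

-- ===== CLAIM (what is proved, stated in full; the proofs are below) =====
def Claim_equal_get_boundary_points : Prop := ∀ (v : List (List Int)) (f : List (List Int)), Dom_get_boundary_points v f → Pre_get_boundary_points v f → Spec_get_boundary_points v f (get_boundary_points v f)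

-- ===== LEMMAS AND PROOFS =====

-- the common reference stream of edges, and the boundary predicate both programs realise
def pvE (f : List (List Int)) : List (Int × Int) := f.flatMap pvEdges3

def pvBdry (f : List (List Int)) (x : Int) : Prop :=
  ∃ e : Int × Int, (pvE f).count e = 1 ∧ (x = e.1 ∨ x = e.2)

-- ---------- A side ----------

theorem pvAFaceStep_eq (d : PySem.Dict (Int × Int) (List Int)) (p : Int × List Int) :
    pvAFaceStep d p = (pvEdges3 p.2).foldl (fun d edge => pvAStep d p.1 edge) d := by
  unfold pvAFaceStep pvEdges3
  rcases PySem.List.sorted p.2 (fun x => x) false with _ | ⟨a, _ | ⟨b, _ | ⟨c, _ | t⟩⟩⟩ <;> rfl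

-- dict invariant: value lengths are the counts of the processed edge stream
def pvInv (d : PySem.Dict (Int × Int) (List Int)) (es : List (Int × Int)) : Prop :=
  d.keys.Nodup ∧ (∀ e, (d.getD e []).length = es.count e) ∧
    (∀ e, d.contains e = true ↔ es.count e ≠ 0)

theorem pvInv_step (d : PySem.Dict (Int × Int) (List Int)) (es : List (Int × Int))
    (i : Int) (ed : Int × Int) (h : pvInv d es) : pvInv (pvAStep d i ed) (es ++ [ed]) := by
  obtain ⟨hnd, hlen, hmem⟩ := h
  unfold pvAStep
  by_cases hc : d.contains ed = true
  · simp only [hc, if_true]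
    refine ⟨?_, ?_, ?_⟩
    · rw [PySem.Dict.keys_modify]; exact PySem.Dict.nodup_keys_insert _ _ _ hnd
    · intro e
      by_cases he : e = ed
      · subst he
        rw [PySem.Dict.getD_modify_self]
        simp [List.count_append, hlen e]
      · rw [PySem.Dict.getD_modify_of_ne _ _ _ he]
        simp [List.count_append, hlen e, Ne.symm he]
    · intro e
      rw [PySem.Dict.contains_modify]
      by_cases he : e = ed
      · subst e
        simp [List.count_append]
      · simp [he, hmem e, List.count_append, Ne.symm he]
  · rw [if_neg hc]
    have hcf : d.contains ed = false := by simpa using hc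
    have hed0 : es.count ed = 0 := by
      by_contra hne
      have := (hmem ed).mpr hne
      simp [hcf] at this
    refine ⟨PySem.Dict.nodup_keys_insert _ _ _ hnd, ?_, ?_⟩
    · intro e
      by_cases he : e = ed
      · subst he
        rw [PySem.Dict.getD_insert_self]
        simp [List.count_append, hed0]
      · rw [PySem.Dict.getD_insert_of_ne _ _ _ he]
        simp [List.count_append, hlen e, Ne.symm he]
    · intro e
      rw [PySem.Dict.contains_insert]
      by_cases he : e = ed
      · subst e
        simp [List.count_append]
      · simp [he, hmem e, List.count_append, Ne.symm he]

theorem pvInv_foldl (d : PySem.Dict (Int × Int) (List Int)) (es es₀ : List (Int × Int))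
    (i : Int) (h : pvInv d es) :
    pvInv (es₀.foldl (fun d edge => pvAStep d i edge) d) (es ++ es₀) := by
  induction es₀ generalizing d es with
  | nil => simpa using h
  | cons ed rest ih =>
    have := ih (pvAStep d i ed) (es ++ [ed]) (pvInv_step d es i ed h)
    simpa [List.append_assoc] using this

theorem pvInv_faces (ps : List (Int × List Int)) (d : PySem.Dict (Int × Int) (List Int))
    (es : List (Int × Int)) (h : pvInv d es) :
    pvInv (ps.foldl pvAFaceStep d) (es ++ ps.flatMap (fun p => pvEdges3 p.2)) := by
  induction ps generalizing d es with
  | nil => simpa using h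
  | cons p rest ih =>
    have h1 := pvInv_foldl d es (pvEdges3 p.2) p.1 h
    rw [← pvAFaceStep_eq] at h1
    have := ih (pvAFaceStep d p) _ h1
    simpa [List.append_assoc] using this

theorem pvInv_final (f : List (List Int)) :
    pvInv ((PySem.List.enumerate f 0).foldl pvAFaceStep PySem.Dict.empty) (pvE f) := by
  have h0 : pvInv PySem.Dict.empty [] := by
    refine ⟨PySem.Dict.nodup_keys_empty, ?_, ?_⟩ <;> intro e <;>
      simp [PySem.Dict.getD_empty, PySem.Dict.contains_empty]
  have h1 := pvInv_faces (PySem.List.enumerate f 0) PySem.Dict.empty [] h0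
  have h2 : (PySem.List.enumerate f 0).flatMap (fun p => pvEdges3 p.2) = pvE f := by
    have h3 := List.flatMap_map (fun p : Int × List Int => p.2) pvEdges3 (PySem.List.enumerate f 0)
    rw [PySem.List.map_snd_enumerate] at h3
    rw [← h3]; rfl
  rw [h2] at h1
  simpa using h1

theorem pvABound_mem (l : List ((Int × Int) × List Int)) (s : PySem.Set Int) (x : Int) :
    x ∈ l.foldl pvABoundStep s ↔
      x ∈ s ∨ ∃ kv ∈ l, kv.2.length = 1 ∧ (x = kv.1.1 ∨ x = kv.1.2) := by
  induction l generalizing s with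
  | nil => simp
  | cons kv rest ih =>
    simp only [List.foldl_cons, ih, List.mem_cons]
    unfold pvABoundStep
    by_cases h1 : kv.2.length = 1
    · simp only [h1, if_true, PySem.Set.mem_update, PySem.Set.mem_ofList]
      constructor
      · rintro ((hx | hx) | ⟨kv', h2, h3, h4⟩)
        · exact Or.inl hx
        · exact Or.inr ⟨kv, Or.inl rfl, h1, by simpa using hx⟩
        · exact Or.inr ⟨kv', Or.inr h2, h3, h4⟩
      · rintro (hx | ⟨kv', (rfl | h2), h3, h4⟩)
        · exact Or.inl (Or.inl hx)
        · exact Or.inl (Or.inr (by simpa using h4))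
        · exact Or.inr ⟨kv', h2, h3, h4⟩
    · simp only [h1, if_false]
      constructor
      · rintro (hx | ⟨kv', h2, h3, h4⟩)
        · exact Or.inl hx
        · exact Or.inr ⟨kv', Or.inr h2, h3, h4⟩
      · rintro (hx | ⟨kv', (rfl | h2), h3, h4⟩)
        · exact Or.inl hx
        · exact absurd h3 h1
        · exact Or.inr ⟨kv', h2, h3, h4⟩

theorem pvABound_nodup (l : List ((Int × Int) × List Int)) (s : PySem.Set Int)
    (h : s.Nodup) : (l.foldl pvABoundStep s).Nodup := by
  induction l generalizing s with
  | nil => exact h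
  | cons kv rest ih =>
    refine ih _ ?_
    unfold pvABoundStep
    split
    · exact PySem.Set.nodup_update _ _ h
    · exact h

theorem pvA_items_iff (f : List (List Int)) (x : Int) :
    (∃ kv ∈ ((PySem.List.enumerate f 0).foldl pvAFaceStep PySem.Dict.empty).items,
        kv.2.length = 1 ∧ (x = kv.1.1 ∨ x = kv.1.2)) ↔ pvBdry f x := by
  obtain ⟨hnd, hlen, hmem⟩ := pvInv_final f
  set d := (PySem.List.enumerate f 0).foldl pvAFaceStep PySem.Dict.empty with hd
  constructor
  · rintro ⟨⟨k, val⟩, h2, h3, h4⟩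
    refine ⟨k, ?_, h4⟩
    have := PySem.Dict.getD_of_mem_items d h2 hnd []
    rw [← hlen k, this, h3]
  · rintro ⟨e, hcount, hx⟩
    have hc : d.contains e = true := (hmem e).mpr (by omega)
    rw [PySem.Dict.contains_eq_isSome_get?] at hc
    obtain ⟨val, hval⟩ := Option.isSome_iff_exists.mp hc
    refine ⟨(e, val), PySem.Dict.mem_items_of_get?_eq_some d hval, ?_, hx⟩
    have := hlen e
    rw [PySem.Dict.getD_eq_get?_getD, hval] at this
    simpa [hcount] using this

-- ---------- B side ----------

theorem pvSorted2_pairwise (es : List (Int × Int)) :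
    (PySem.List.sorted2 es (fun e => e.1) (fun e => e.2) false).Pairwise
      (fun a b => toLex a ≤ toLex b) := by
  have hb : (fun a b : Int × Int =>
        (decide (a.1 < b.1) || (!decide (b.1 < a.1) && decide (a.2 < b.2))))
      = fun a b : Int × Int => decide (toLex a < toLex b) := by
    funext a b
    rcases lt_trichotomy a.1 b.1 with h | h | h
    · simp [Prod.Lex.toLex_lt_toLex, h]
    · simp [Prod.Lex.toLex_lt_toLex, h]
    · simp only [Prod.Lex.toLex_lt_toLex]
      have h1 : ¬ a.1 < b.1 := not_lt_of_gt h
      have h2 : a.1 ≠ b.1 := h.ne'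
      simp [h, h1, h2]
  have key : ∀ (xs acc : List (Int × Int)),
      acc.Pairwise (fun a b : Int × Int => toLex a ≤ toLex b) →
      (xs.foldl (fun acc x =>
          PySem.List.insertBy (fun a b : Int × Int => decide (toLex a < toLex b)) x acc) acc).Pairwise
        (fun a b : Int × Int => toLex a ≤ toLex b) := by
    intro xs
    induction xs with
    | nil => intro acc h; exact h
    | cons x rest ih =>
      intro acc h
      exact ih _ (PySem.List.insertBy_pairwise_le (fun e : Int × Int => toLex e) x acc h)
  simp only [PySem.List.sorted2, if_neg (by decide : ¬ (false = true))]
  rw [hb]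
  exact key es [] (List.Pairwise.nil)

theorem pvScan_mem (es : List (Int × Int)) (b : PySem.Set Int) :
    es.Pairwise (fun a b : Int × Int => toLex a ≤ toLex b) → ∀ x : Int,
    x ∈ pvScan es b ↔ x ∈ b ∨ ∃ e : Int × Int, es.count e = 1 ∧ (x = e.1 ∨ x = e.2) := by
  induction es, b using pvScan.induct with
  | case1 b => intro _ x; simp [pvScan]
  | case2 b e rest same' rest'' ih =>
    intro hs x
    have hsplit : rest.takeWhile (fun y => y == e) ++ rest.dropWhile (fun y => y == e) = rest :=
      List.takeWhile_append_dropWhile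
    obtain ⟨h1, h2⟩ := List.pairwise_cons.mp hs
    have hrp : (rest.dropWhile (fun y => y == e)).Pairwise
        (fun a b : Int × Int => toLex a ≤ toLex b) :=
      List.Pairwise.sublist (List.dropWhile_sublist _) h2
    have hne : ∀ z ∈ rest.dropWhile (fun y => y == e), z ≠ e := by
      intro z hz heq
      cases hdw : rest.dropWhile (fun y => y == e) with
      | nil => rw [hdw] at hz; exact absurd hz List.not_mem_nil
      | cons d tail =>
        have hdne' : d ≠ e := by
          have hw : rest.dropWhile (fun y : Int × Int => y == e) ≠ [] := by simp [hdw]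
          have hh := List.head_dropWhile_not (fun y : Int × Int => y == e) hw
          have hd : (rest.dropWhile (fun y : Int × Int => y == e)).head hw = d := by
            simp [hdw]
          rw [hd] at hh
          simpa using hh
        rw [hdw] at hz
        rcases List.mem_cons.mp hz with rfl | hz'
        · exact hdne' heq
        · have hdtail : (d :: tail).Pairwise (fun a b : Int × Int => toLex a ≤ toLex b) :=
            hdw ▸ hrp
          have hdz : toLex d ≤ toLex z := (List.pairwise_cons.mp hdtail).1 z hz'
          have hdmem : d ∈ rest := (List.dropWhile_sublist _).subset (by rw [hdw]; exact List.mem_cons_self)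
          have hed : toLex e ≤ toLex d := h1 d hdmem
          subst heq
          exact hdne' (by simpa using le_antisymm hdz hed : d = z)
    have hcnt0 : (rest.dropWhile (fun y => y == e)).count e = 0 :=
      List.count_eq_zero.mpr (fun h => hne e h rfl)
    have hsame : ∀ z ∈ rest.takeWhile (fun y => y == e), z = e := by
      intro z hz
      simpa using List.mem_takeWhile_imp hz
    have hcse : (rest.takeWhile (fun y => y == e)).count e
        = (rest.takeWhile (fun y => y == e)).length :=
      List.count_eq_length.mpr (fun bz hbz => (hsame bz hbz).symm)
    have hce : (e :: rest).count e = 1 + (rest.takeWhile (fun y => y == e)).length := by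
      rw [List.count_cons, ← hsplit, List.count_append, hcse, hcnt0]
      simp [Nat.add_comm]
    have hcne : ∀ e' : Int × Int, e' ≠ e →
        (e :: rest).count e' = (rest.dropWhile (fun y => y == e)).count e' := by
      intro e' h
      have ht : (rest.takeWhile (fun y => y == e)).count e' = 0 :=
        List.count_eq_zero.mpr (fun hm => h (hsame e' hm))
      rw [List.count_cons, ← hsplit, List.count_append, ht]
      simp [Ne.symm h]
    rw [pvScan]
    rw [show (if (List.takeWhile (fun y : Int × Int => y == e) rest).length = 0
        then (b.add e.1).add e.2 else b)
      = (if h : (List.takeWhile (fun y : Int × Int => y == e) rest).length = 0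
        then (b.add e.1).add e.2 else b) from by split <;> rfl] at *
    by_cases hz : (rest.takeWhile (fun y : Int × Int => y == e)).length = 0
    · have ihx := ih hrp x
      rw [dif_pos (show same'.length = 0 from hz)] at ihx
      have hre : rest'' = List.dropWhile (fun y : Int × Int => y == e) rest := rfl
      rw [hre] at ihx
      rw [dif_pos hz, ihx]
      simp only [PySem.Set.mem_add]
      constructor
      · rintro (((hb | h1x) | h2x) | ⟨e', hc', hv'⟩)
        · exact Or.inl hb
        · exact Or.inr ⟨e, by rw [hce, hz], Or.inl h1x⟩
        · exact Or.inr ⟨e, by rw [hce, hz], Or.inr h2x⟩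
        · have he' : e' ≠ e := fun h => by rw [h, hcnt0] at hc'; exact one_ne_zero hc'.symm
          exact Or.inr ⟨e', by rw [hcne e' he']; exact hc', hv'⟩
      · rintro (hb | ⟨e', hc', hv'⟩)
        · exact Or.inl (Or.inl (Or.inl hb))
        · by_cases he' : e' = e
          · subst he'
            rcases hv' with h | h
            · exact Or.inl (Or.inl (Or.inr h))
            · exact Or.inl (Or.inr h)
          · exact Or.inr ⟨e', by rw [← hcne e' he']; exact hc', hv'⟩
    · have ihx := ih hrp x
      rw [dif_neg (show ¬ same'.length = 0 from hz)] at ihx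
      have hre : rest'' = List.dropWhile (fun y : Int × Int => y == e) rest := rfl
      rw [hre] at ihx
      rw [dif_neg hz, ihx]
      constructor
      · rintro (hb | ⟨e', hc', hv'⟩)
        · exact Or.inl hb
        · have he' : e' ≠ e := fun h => by rw [h, hcnt0] at hc'; exact one_ne_zero hc'.symm
          exact Or.inr ⟨e', by rw [hcne e' he']; exact hc', hv'⟩
      · rintro (hb | ⟨e', hc', hv'⟩)
        · exact Or.inl hb
        · by_cases he' : e' = e
          · subst he'
            rw [hce] at hc'
            omega
          · exact Or.inr ⟨e', by rw [← hcne e' he']; exact hc', hv'⟩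

theorem pvScan_nodup (es : List (Int × Int)) (b : PySem.Set Int) :
    b.Nodup → (pvScan es b).Nodup := by
  induction es, b using pvScan.induct with
  | case1 b => intro h; simpa [pvScan] using h
  | case2 b e rest same' rest'' ih =>
    intro h
    rw [pvScan]
    apply ih
    split
    · exact PySem.Set.nodup_add _ _ (PySem.Set.nodup_add _ _ h)
    · exact h

theorem pvB_edges (f : List (List Int)) :
    f.foldl (fun es face => es ++ pvEdges3 face) [] = pvE f := by
  simpa using PySem.List.foldl_append_eq_flatMap pvEdges3 f []

-- ===== VERDICT (by name: the statement is the Claim_ definition above) =====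
theorem get_boundary_points_spec : Claim_equal_get_boundary_points := by
  intro v f _ _
  show get_boundary_points v f = get_boundary_points_alt v f
  simp only [get_boundary_points, get_boundary_points_alt]
  rw [pvB_edges f]
  apply PySem.List.sorted_eq_sorted_of_perm _ _ _ (fun a b h => h)
  have hAnodup : (((PySem.List.enumerate f 0).foldl pvAFaceStep
      PySem.Dict.empty).items.foldl pvABoundStep PySem.Set.empty).Nodup :=
    pvABound_nodup _ _ List.nodup_nil
  have hBnodup : (pvScan (PySem.List.sorted2 (pvE f) (fun e => e.1) (fun e => e.2) false)
      PySem.Set.empty).Nodup :=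
    pvScan_nodup _ _ List.nodup_nil
  rw [List.perm_ext_iff_of_nodup hAnodup hBnodup]
  intro x
  rw [pvABound_mem, pvScan_mem _ _ (pvSorted2_pairwise (pvE f)) x]
  have hperm := PySem.List.sorted2_perm (pvE f) (fun e : Int × Int => e.1)
    (fun e : Int × Int => e.2) false
  have hcnt : ∀ e : Int × Int,
      (PySem.List.sorted2 (pvE f) (fun e => e.1) (fun e => e.2) false).count e
        = (pvE f).count e := fun e => hperm.count_eq e
  simp only [hcnt]
  have hitems := pvA_items_iff f x
  unfold pvBdry at hitems
  rw [show (PySem.Set.empty : PySem.Set Int) = [] from rfl]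
  simp only [List.not_mem_nil, false_or]
  exact hitems
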